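-- pv_equiv track=rewrite | github.com/RupertJoo/Ssafy_Algorithm_Study | HongchanJoo/getCypher.py | getCypher
-- ===== SOURCE A (Python) =====
-- def getCypher(room):
--     pw = -1237
--     dic = {
--         "B": 1,
--         "0": 2,
--         "1": 3,
--         "2": 4,
--         "3": 5,
--         "4": 6,
--         "5": 7,
--         "6": 8,
--         "7": 9,
--         "8": 10,
--         "9": 11
--         }
--     for i, r in enumerate(room[::-1]):
--         pw += dic[r] * 13 ** i
--     return pw
-- ===== SOURCE B (Python) =====
-- def getCypher(room):
--     def val(c):
--         if c == "B":
--             return 1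
--         if "0" <= c <= "9":
--             return ord(c) - ord("0") + 2
--         raise KeyError(c)
--     pw = 0
--     for c in room:
--         pw = pw * 13 + val(c)
--     return pw - 1237
-- ===== Notes on version B (the rewrite author's own statement) =====
-- stated objective: alternative
-- what changed: Drops the digit dictionary in favour of an arithmetic character-code value (letter B maps to 1, decimal digits to their code minus 46) and replaces the reversed-enumerate sum of dic[r]*13**i terms with a forward Horner accumulation pw = pw*13 + val(c).
import Mathlib
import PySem

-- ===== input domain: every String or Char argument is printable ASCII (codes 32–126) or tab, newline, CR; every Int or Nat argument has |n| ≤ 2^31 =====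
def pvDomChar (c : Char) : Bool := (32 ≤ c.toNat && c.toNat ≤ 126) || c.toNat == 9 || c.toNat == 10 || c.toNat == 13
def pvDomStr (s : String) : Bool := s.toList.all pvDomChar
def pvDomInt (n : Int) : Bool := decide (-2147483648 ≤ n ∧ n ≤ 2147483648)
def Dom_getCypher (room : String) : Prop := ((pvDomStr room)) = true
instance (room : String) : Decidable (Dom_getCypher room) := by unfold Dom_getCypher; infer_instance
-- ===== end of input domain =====

-- B drops A's dictionary (digit value computed arithmetically from the char code) and the
-- reversal/powers (forward Horner accumulation); objective: alternative.

-- ===== PORT A =====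
-- A's dict 'dic'
def pvDic : PySem.Dict Char Int :=
  PySem.Dict.ofList [('B',1),('0',2),('1',3),('2',4),('3',5),('4',6),('5',7),
                     ('6',8),('7',9),('8',10),('9',11)]

-- room[::-1] reversed; dic[r] raises KeyError on a char outside the map —
-- Pre_ excludes those strings, so getD 0 is exact on Pre_.
def getCypher (room : String) : Int :=
  (PySem.List.enumerate room.toList.reverse 0).foldl
    (fun pw p => pw + pvDic.getD p.2 0 * 13 ^ p.1.toNat) (-1237)

-- ===== PORT B =====
-- Source B's val(c): the 'raise KeyError' branch is excluded by Pre_, ported as 0.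
def pvVal (c : Char) : Int :=
  if c = 'B' then 1
  else if '0' ≤ c ∧ c ≤ '9' then (c.toNat : Int) - 48 + 2
  else 0

def getCypher_alt (room : String) : Int :=
  room.toList.foldl (fun pw c => pw * 13 + pvVal c) 0 - 1237

-- ===== PRECONDITION & SPEC =====
-- Pre_ excludes exactly the strings with a character outside the digit map, where both
-- Pythons raise KeyError.
def Pre_getCypher (room : String) : Prop :=
  (room.toList.all (fun c => pvDic.contains c)) = true
instance (room : String) : Decidable (Pre_getCypher room) := by unfold Pre_getCypher; infer_instance
def pvWitness_getCypher : String := "B0129"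
def Spec_getCypher (room : String) (out : Int) : Prop := out = getCypher_alt room
instance (room : String) (out : Int) : Decidable (Spec_getCypher room out) := by unfold Spec_getCypher; infer_instance

-- ===== CLAIM =====
def Claim_equal_getCypher : Prop := ∀ (room : String), Dom_getCypher room → Pre_getCypher room → Spec_getCypher room (getCypher room)

-- ===== LEMMAS AND PROOFS =====

-- positional sum of l with weights 13^s, 13^(s+1), … using A's dict
def pvS : List Char → Nat → Int
  | [], _ => 0
  | c :: t, s => pvDic.getD c 0 * 13 ^ s + pvS t (s + 1)

lemma pvA_fold (l : List Char) (s : Nat) (acc : Int) :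
    (PySem.List.enumerate l (s : Int)).foldl
      (fun pw p => pw + pvDic.getD p.2 0 * 13 ^ p.1.toNat) acc
      = acc + pvS l s := by
  induction l generalizing s acc with
  | nil => simp [PySem.List.enumerate, pvS]
  | cons c t ih =>
      rw [PySem.List.enumerate_cons]
      simp only [List.foldl_cons]
      have : ((s : Int) + 1) = ((s + 1 : Nat) : Int) := by push_cast; ring
      rw [this, ih]
      simp [pvS]
      ring

lemma pvS_append (xs ys : List Char) (s : Nat) :
    pvS (xs ++ ys) s = pvS xs s + pvS ys (s + xs.length) := by
  induction xs generalizing s with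
  | nil => simp [pvS]
  | cons c t ih => simp [pvS, ih, Nat.add_assoc, Nat.add_comm 1]; ring

lemma pvHorner_acc (l : List Char) (acc : Int) :
    l.foldl (fun pw c => pw * 13 + pvDic.getD c 0) acc
      = acc * 13 ^ l.length + l.foldl (fun pw c => pw * 13 + pvDic.getD c 0) 0 := by
  induction l generalizing acc with
  | nil => simp
  | cons c t ih =>
      simp only [List.foldl_cons, List.length_cons]
      rw [ih (acc * 13 + pvDic.getD c 0), ih (0 * 13 + pvDic.getD c 0)]
      ring

lemma pvS_rev_eq_horner (l : List Char) :
    pvS l.reverse 0 = l.foldl (fun pw c => pw * 13 + pvDic.getD c 0) 0 := by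
  induction l with
  | nil => simp [pvS]
  | cons c t ih =>
      rw [List.reverse_cons, pvS_append, ih]
      simp only [List.foldl_cons, List.length_reverse]
      rw [pvHorner_acc t (0 * 13 + pvDic.getD c 0)]
      simp [pvS]
      ring

-- on chars of the map, B's arithmetic value agrees with A's dict
lemma pvVal_eq_dic (c : Char) (h : pvDic.contains c = true) :
    pvDic.getD c 0 = pvVal c := by
  have : c = 'B' ∨ c = '0' ∨ c = '1' ∨ c = '2' ∨ c = '3' ∨ c = '4' ∨ c = '5' ∨
      c = '6' ∨ c = '7' ∨ c = '8' ∨ c = '9' := by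
    rw [PySem.Dict.contains_eq_decide_mem_keys] at h
    have hk : pvDic.keys = ['B','0','1','2','3','4','5','6','7','8','9'] := by decide
    rw [hk] at h
    simpa using h
  rcases this with h|h|h|h|h|h|h|h|h|h|h <;> subst h <;> decide

-- ===== VERDICT =====
theorem getCypher_spec : Claim_equal_getCypher := by
  intro room _ hpre
  unfold Spec_getCypher getCypher getCypher_alt
  have h := pvA_fold room.toList.reverse 0 (-1237)
  rw [Nat.cast_zero] at h
  rw [h, pvS_rev_eq_horner]
  have hcong : room.toList.foldl (fun pw c => pw * 13 + pvDic.getD c 0) 0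
      = room.toList.foldl (fun pw c => pw * 13 + pvVal c) 0 := by
    apply PySem.List.foldl_congr_mem
    intro acc x hx
    rw [pvVal_eq_dic x]
    exact List.all_eq_true.mp hpre x hx
  rw [hcong]; ring
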